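-- pv_equiv track=rewrite | github.com/MilesBDyson/sh1106-oled-SGU-Elders-Clock. | time.py | build_glyph_from_digit
-- ===== SOURCE A (Python) =====
-- GLYPH_BLOCKS_PER_ROW = 3
--
-- GLYPH_ROWS_INNER = 3  # number of inner rows
--
-- def build_glyph_from_digit(d):
--     # d: int 0..9
--     # total inner blocks = 9, fill left-to-right, top-to-bottom
--     n = int(d)
--     rows = []
--     rows.append("######")
--     blocks_left = n
--     for r in range(GLYPH_ROWS_INNER):
--         row = []
--         for b in range(GLYPH_BLOCKS_PER_ROW):
--             if blocks_left > 0: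
--                 row.append("##")
--                 blocks_left -= 1
--             else:
--                 row.append("  ")
--         rows.append("".join(row))
--     rows.append("######")
--     rows.append("  ##  ")
--     return rows
-- ===== SOURCE B (Python) =====
-- def build_glyph_from_digit(d):
--     # closed-form fill count + flat string chunking instead of counter-driven nested loops
--     k = max(0, min(int(d), 9))
--     flat = "##" * k + "  " * (9 - k)
--     return ["######", flat[0:6], flat[6:12], flat[12:18], "######", "  ##  "]
-- ===== Notes on version B (the rewrite author's own statement) =====
-- stated objective: simpler
-- what changed: Replaces the counter-driven nested row/block loop with a closed-form clamped fill count k = max(0, min(d, 9)), one flat string of filled-then-empty blocks, and three equal slices of it as the inner rows.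
import Mathlib
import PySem

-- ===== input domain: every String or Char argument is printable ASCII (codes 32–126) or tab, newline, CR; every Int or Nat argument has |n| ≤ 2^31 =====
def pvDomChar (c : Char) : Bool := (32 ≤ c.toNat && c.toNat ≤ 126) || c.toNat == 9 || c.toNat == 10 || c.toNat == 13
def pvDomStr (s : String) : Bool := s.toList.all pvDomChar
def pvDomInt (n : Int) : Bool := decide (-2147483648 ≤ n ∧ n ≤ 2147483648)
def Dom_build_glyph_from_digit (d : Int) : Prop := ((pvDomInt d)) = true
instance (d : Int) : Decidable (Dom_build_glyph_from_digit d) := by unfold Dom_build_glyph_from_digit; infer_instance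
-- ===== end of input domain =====

-- B replaces A's counter-driven nested 3x3 loop by a closed-form fill count plus
-- flat-string chunking (objective: simpler); return value only, A mutates nothing.

-- ===== PORT A =====
-- inner loop body: append "##" while blocks_left > 0, else "  "
def bgCell (st : List String × Int) (_b : Int) : List String × Int :=
  if st.2 > 0 then (st.1 ++ ["##"], st.2 - 1) else (st.1 ++ ["  "], st.2)

-- outer loop body: build one inner row, join it, append to rows
def bgRow (st : List String × Int) (_r : Int) : List String × Int :=
  let inner := (PySem.List.pyRange 0 3 1).foldl bgCell ([], st.2)
  (st.1 ++ [PySem.Str.join "" inner.1], inner.2)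

def build_glyph_from_digit (d : Int) : List String :=
  let n := d  -- int(d)
  let rows : List String := ["######"]
  let st := (PySem.List.pyRange 0 3 1).foldl bgRow (rows, n)
  st.1 ++ ["######", "  ##  "]

-- ===== PORT B =====
def build_glyph_from_digit_alt (d : Int) : List String :=
  let k := max 0 (min d 9)
  let flat := PySem.List.pyRepeat ['#', '#'] k ++ PySem.List.pyRepeat [' ', ' '] (9 - k)
  ["######",
   String.ofList (PySem.List.slice flat (some 0) (some 6)),
   String.ofList (PySem.List.slice flat (some 6) (some 12)),
   String.ofList (PySem.List.slice flat (some 12) (some 18)),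
   "######", "  ##  "]

-- ===== PRECONDITION & SPEC =====
def Spec_build_glyph_from_digit (d : Int) (out : List String) : Prop := out = build_glyph_from_digit_alt d
instance (d : Int) (out : List String) : Decidable (Spec_build_glyph_from_digit d out) := by unfold Spec_build_glyph_from_digit; infer_instance

-- ===== CLAIM (what is proved, stated in full; the proofs are below) =====
def Claim_equal_build_glyph_from_digit : Prop := ∀ (d : Int), Dom_build_glyph_from_digit d → Spec_build_glyph_from_digit d (build_glyph_from_digit d)

-- ===== LEMMAS AND PROOFS =====

lemma bgRange3 : PySem.List.pyRange 0 3 1 = ([0, 1, 2] : List Int) := by decide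

-- inner 3-cell fold: all empty when no blocks remain
lemma bgInner_nonpos (bl : Int) (h : bl ≤ 0) :
    (PySem.List.pyRange 0 3 1).foldl bgCell ([], bl) = (["  ", "  ", "  "], bl) := by
  rw [bgRange3]
  simp only [List.foldl, bgCell]
  split_ifs <;> first | rfl | omega

-- inner 3-cell fold: all filled when at least 3 blocks remain
lemma bgInner_ge3 (bl : Int) (h : 3 ≤ bl) :
    (PySem.List.pyRange 0 3 1).foldl bgCell ([], bl) = (["##", "##", "##"], bl - 3) := by
  rw [bgRange3]
  simp only [List.foldl, bgCell]
  split_ifs <;> first | (simp only [Prod.mk.injEq]; exact ⟨rfl, by omega⟩) | omega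

lemma bgRow_nonpos (s : List String) (bl r : Int) (h : bl ≤ 0) :
    bgRow (s, bl) r = (s ++ ["      "], bl) := by
  simp only [bgRow, bgInner_nonpos bl h]
  have hj : PySem.Str.join "" ["  ", "  ", "  "] = "      " := by decide
  rw [hj]

lemma bgRow_ge3 (s : List String) (bl r : Int) (h : 3 ≤ bl) :
    bgRow (s, bl) r = (s ++ ["######"], bl - 3) := by
  simp only [bgRow, bgInner_ge3 bl h]
  have hj : PySem.Str.join "" ["##", "##", "##"] = "######" := by decide
  rw [hj]

-- both ports depend on d only through its clamp to [0,9]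
lemma bgA_clamp (d : Int) :
    build_glyph_from_digit d = build_glyph_from_digit (max 0 (min d 9)) := by
  by_cases h : d ≤ 0
  · have h0 : max 0 (min d 9) = 0 := by omega
    rw [h0]
    simp only [build_glyph_from_digit, bgRange3, List.foldl]
    rw [bgRow_nonpos _ _ _ h, bgRow_nonpos _ _ _ h, bgRow_nonpos _ _ _ h,
      bgRow_nonpos _ _ _ (by omega : (0 : Int) ≤ 0),
      bgRow_nonpos _ _ _ (by omega : (0 : Int) ≤ 0),
      bgRow_nonpos _ _ _ (by omega : (0 : Int) ≤ 0)]
  · by_cases h9 : d ≤ 9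
    · have : max 0 (min d 9) = d := by omega
      rw [this]
    · have h0 : max 0 (min d 9) = 9 := by omega
      rw [h0]
      simp only [build_glyph_from_digit, bgRange3, List.foldl]
      rw [bgRow_ge3 _ _ _ (by omega : (3 : Int) ≤ d),
        bgRow_ge3 _ _ _ (by omega : (3 : Int) ≤ d - 3),
        bgRow_ge3 _ _ _ (by omega : (3 : Int) ≤ d - 3 - 3),
        bgRow_ge3 _ _ _ (by omega : (3 : Int) ≤ 9),
        bgRow_ge3 _ _ _ (by omega : (3 : Int) ≤ 9 - 3),
        bgRow_ge3 _ _ _ (by omega : (3 : Int) ≤ 9 - 3 - 3)]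

lemma bgB_clamp (d : Int) :
    build_glyph_from_digit_alt d = build_glyph_from_digit_alt (max 0 (min d 9)) := by
  simp only [build_glyph_from_digit_alt]
  have : max 0 (min (max 0 (min d 9)) 9) = max 0 (min d 9) := by omega
  rw [this]

-- ===== VERDICT (by name: the statement is the Claim_ definition above) =====
theorem build_glyph_from_digit_spec : Claim_equal_build_glyph_from_digit := by
  intro d _
  show build_glyph_from_digit d = build_glyph_from_digit_alt d
  rw [bgA_clamp, bgB_clamp]
  set k := max 0 (min d 9) with hk
  have hk1 : 0 ≤ k := by omega
  have hk2 : k ≤ 9 := by omega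
  clear hk
  interval_cases k <;> decide
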